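-- pv_equiv track=rewrite | github.com/AlexandreRiedo/leadsheet-utility | src/leadsheet_utility/backing/walking_bass.py | _pick_root
-- ===== SOURCE A (Python) =====
-- BASS_MID = 38  # approximate centre of range
--
-- def _closest(target: int, candidates: list[int]) -> int:
--     """Return the candidate nearest to *target*."""
--     return min(candidates, key=lambda n: abs(n - target))
--
-- def _pick_root(
--     roots: list[int], prev_note: int | None, ascending: bool = False,
-- ) -> int:
--     """Pick a root note in bass range, direction-aware."""
--     if prev_note is None:
--         return _closest(BASS_MID, roots)
--     if ascending:
--         preferred = [n for n in roots if n >= prev_note]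
--     else:
--         preferred = [n for n in roots if n <= prev_note]
--     pool = preferred if preferred else roots
--     return _closest(prev_note, pool)
-- ===== SOURCE B (Python) =====
-- BASS_MID = 38
--
--
-- def _pick_root(
--     roots: list[int], prev_note: int | None, ascending: bool = False,
-- ) -> int:
--     """Stable-sort roots by distance to the target, then take the first
--     acceptable note: sorting is stable, so the first element with a given
--     distance is the earliest occurrence, matching min()'s first-wins rule."""
--     if prev_note is None:
--         return sorted(roots, key=lambda n: abs(n - BASS_MID))[0]
--     ordered = sorted(roots, key=lambda n: abs(n - prev_note))
--     for n in ordered: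
--         if (n >= prev_note) if ascending else (n <= prev_note):
--             return n
--     return ordered[0]
-- ===== Notes on version B (the rewrite author's own statement) =====
-- stated objective: alternative
-- what changed: Replaces the build-filtered-list-then-min(key=...) pipeline by one stable sort of roots by distance followed by taking the first element that satisfies the direction predicate (falling back to the overall first), relying on sort stability for min()'s first-wins tie-breaking.
import Mathlib
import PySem

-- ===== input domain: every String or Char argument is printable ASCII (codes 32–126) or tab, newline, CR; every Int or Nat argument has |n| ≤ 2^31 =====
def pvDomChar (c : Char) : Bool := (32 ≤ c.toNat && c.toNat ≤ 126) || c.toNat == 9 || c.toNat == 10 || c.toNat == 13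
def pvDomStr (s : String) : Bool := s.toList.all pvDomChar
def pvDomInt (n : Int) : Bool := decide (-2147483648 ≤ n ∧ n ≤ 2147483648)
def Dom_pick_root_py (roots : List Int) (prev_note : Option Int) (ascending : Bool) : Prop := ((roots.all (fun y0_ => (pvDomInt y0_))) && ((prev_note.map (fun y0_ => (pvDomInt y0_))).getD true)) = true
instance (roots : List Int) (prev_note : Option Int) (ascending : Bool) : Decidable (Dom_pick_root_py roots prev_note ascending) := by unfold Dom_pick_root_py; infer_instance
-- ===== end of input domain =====

-- B replaces the filter/min(key=…) pipeline by one stable sort by distance followed by a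
-- first-acceptable scan (alternative decomposition; no speed claim).

-- ===== PORT A =====
-- helper _closest: min(candidates, key=lambda n: abs(n - target)); min([]) raises ValueError (excluded by Pre_)
def closest_py (target : Int) (candidates : List Int) : Int :=
  match PySem.List.min? candidates (fun n => (n - target).natAbs) with
  | some m => m
  | none => 0  -- unreachable under Pre_pick_root_py (Python raises ValueError here)

def pick_root_py (roots : List Int) (prev_note : Option Int) (ascending : Bool) : Int :=
  match prev_note with
  | none => closest_py 38 roots
  | some p =>
    let preferred := if ascending then roots.filter (fun n => decide (p ≤ n))
                     else roots.filter (fun n => decide (n ≤ p))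
    let pool := if preferred.isEmpty then roots else preferred
    closest_py p pool

-- ===== PORT B =====
-- B: sorted(roots, key=distance) once (stable), then the first acceptable note;
-- the for-loop with early return is find?, sorted([])[0] (IndexError) is outside Pre_.
def pick_root_py_alt (roots : List Int) (prev_note : Option Int) (ascending : Bool) : Int :=
  match prev_note with
  | none => (PySem.List.sorted roots (fun n => (n - 38).natAbs)).headD 0  -- [] raises IndexError: outside Pre_
  | some p =>
    let ordered := PySem.List.sorted roots (fun n => (n - p).natAbs)
    match ordered.find? (fun n => if ascending then decide (p ≤ n) else decide (n ≤ p)) with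
    | some n => n
    | none => ordered.headD 0  -- [] raises IndexError: outside Pre_

-- ===== PRECONDITION & SPEC =====
-- Pre_ excludes only the empty roots list, on which Python A raises ValueError (min of empty sequence).
def Pre_pick_root_py (roots : List Int) (prev_note : Option Int) (ascending : Bool) : Prop :=
  roots ≠ []
instance (roots : List Int) (prev_note : Option Int) (ascending : Bool) : Decidable (Pre_pick_root_py roots prev_note ascending) := by unfold Pre_pick_root_py; infer_instance

def pvWitness_pick_root_py : List Int × Option Int × Bool := ([40, 33, 45], some 36, true)

def Spec_pick_root_py (roots : List Int) (prev_note : Option Int) (ascending : Bool) (out : Int) : Prop := out = pick_root_py_alt roots prev_note ascending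
instance (roots : List Int) (prev_note : Option Int) (ascending : Bool) (out : Int) : Decidable (Spec_pick_root_py roots prev_note ascending out) := by unfold Spec_pick_root_py; infer_instance

-- ===== CLAIM (what is proved, stated in full; the proofs are below) =====
def Claim_equal_pick_root_py : Prop := ∀ (roots : List Int) (prev_note : Option Int) (ascending : Bool), Dom_pick_root_py roots prev_note ascending → Pre_pick_root_py roots prev_note ascending → Spec_pick_root_py roots prev_note ascending (pick_root_py roots prev_note ascending)

-- ===== LEMMAS AND PROOFS =====

-- the fold step of Python's min(…, key=…) (first-wins: strict comparison)
def minStep (key : Int → Nat) (acc : Option Int) (y : Int) : Option Int :=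
  match acc with
  | none => some y
  | some m => if key y < key m then some y else some m

theorem min?_eq_foldl_step (key : Int → Nat) (xs : List Int) :
    PySem.List.min? xs key = xs.foldl (minStep key) none := by
  unfold PySem.List.min? minStep
  congr 1
  funext acc y
  cases acc <;> rfl

-- insertion keeps the accumulator sorted by key
theorem pw_insertBy (key : Int → Nat) (x : Int) (ys : List Int)
    (h : ys.Pairwise (fun a b => key a ≤ key b)) :
    (PySem.List.insertBy (fun a b => decide (key a < key b)) x ys).Pairwise
      (fun a b => key a ≤ key b) := by
  induction ys with
  | nil => simp [PySem.List.insertBy]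
  | cons y ys ih =>
    rcases List.pairwise_cons.mp h with ⟨hy, hys⟩
    simp only [PySem.List.insertBy]
    split_ifs with hlt
    · simp only [decide_eq_true_eq] at hlt
      refine List.pairwise_cons.mpr ⟨?_, h⟩
      intro z hz
      rcases List.mem_cons.mp hz with rfl | hz'
      · omega
      · have := hy z hz'; omega
    · simp only [decide_eq_true_eq, not_lt] at hlt
      refine List.pairwise_cons.mpr ⟨?_, ih hys⟩
      intro z hz
      rcases (PySem.List.mem_insertBy _ _ _ _).mp hz with rfl | hz'
      · omega
      · exact hy z hz'

-- inserting an element strictly smaller than everything puts it in front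
theorem insertBy_cons_of_all (key : Int → Nat) (x : Int) (zs : List Int)
    (h : ∀ z ∈ zs, key x < key z) :
    PySem.List.insertBy (fun a b => decide (key a < key b)) x zs = x :: zs := by
  cases zs with
  | nil => simp [PySem.List.insertBy]
  | cons z zs => simp [PySem.List.insertBy, h z (List.mem_cons_self)]

-- filtering commutes with a single stable insertion into a sorted list
theorem filter_insertBy (key : Int → Nat) (p : Int → Bool) (x : Int) (ys : List Int)
    (h : ys.Pairwise (fun a b => key a ≤ key b)) :
    (PySem.List.insertBy (fun a b => decide (key a < key b)) x ys).filter p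
      = if p x then PySem.List.insertBy (fun a b => decide (key a < key b)) x (ys.filter p)
        else ys.filter p := by
  induction ys with
  | nil => cases hp : p x <;> simp [PySem.List.insertBy, hp]
  | cons y ys ih =>
    rcases List.pairwise_cons.mp h with ⟨hy, hys⟩
    by_cases hlt : key x < key y
    · have hstep : PySem.List.insertBy (fun a b => decide (key a < key b)) x (y :: ys)
          = x :: y :: ys := by simp [PySem.List.insertBy, hlt]
      have hall : ∀ z ∈ (y :: ys).filter p, key x < key z := by
        intro z hz
        rcases List.mem_cons.mp (List.mem_of_mem_filter hz) with rfl | hz'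
        · exact hlt
        · have := hy z hz'; omega
      rw [hstep, List.filter_cons]
      cases hp : p x
      · simp
      · simp only [if_true]
        rw [insertBy_cons_of_all key x _ hall]
    · have hstep : PySem.List.insertBy (fun a b => decide (key a < key b)) x (y :: ys)
          = y :: PySem.List.insertBy (fun a b => decide (key a < key b)) x ys := by
        simp [PySem.List.insertBy, hlt]
      rw [hstep, List.filter_cons, List.filter_cons, ih hys]
      by_cases hp : p x = true <;> by_cases hpy : p y = true <;>
        simp only [hp, hpy, if_true, if_false] <;>
        simp [PySem.List.insertBy, hlt, hp, hpy]

-- filtering commutes with the whole insertion-sort fold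
theorem filter_foldl_ins (key : Int → Nat) (p : Int → Bool) :
    ∀ (xs acc : List Int), acc.Pairwise (fun a b => key a ≤ key b) →
      (xs.foldl (fun acc x => PySem.List.insertBy (fun a b => decide (key a < key b)) x acc) acc).filter p
        = (xs.filter p).foldl (fun acc x => PySem.List.insertBy (fun a b => decide (key a < key b)) x acc) (acc.filter p) := by
  intro xs
  induction xs with
  | nil => intro acc _; rfl
  | cons x xs ih =>
    intro acc hacc
    have h1 := ih _ (pw_insertBy key x acc hacc)
    rw [List.foldl_cons, h1, filter_insertBy key p x acc hacc]
    cases hp : p x <;> simp [List.filter_cons, hp]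

-- sorted commutes with filter (stability of Python's sort)
theorem sorted_filter (key : Int → Nat) (p : Int → Bool) (xs : List Int) :
    PySem.List.sorted (xs.filter p) key = (PySem.List.sorted xs key).filter p := by
  rw [PySem.List.sorted_eq_foldl_insertBy, PySem.List.sorted_eq_foldl_insertBy]
  have := filter_foldl_ins key p xs [] List.Pairwise.nil
  simpa using this.symm

-- min?'s fold started from some x
theorem min?_fold_some (key : Int → Nat) :
    ∀ (xs : List Int) (x : Int),
      xs.foldl (minStep key) (some x)
        = some (match PySem.List.min? xs key with
                | none => x
                | some m => if key m < key x then m else x) := by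
  intro xs
  induction xs with
  | nil => intro x; rfl
  | cons y ys ih =>
    intro x
    have hstep : minStep key (some x) y = some (if key y < key x then y else x) := by
      simp only [minStep]
      split_ifs <;> rfl
    have hmin : PySem.List.min? (y :: ys) key = ys.foldl (minStep key) (some y) := by
      rw [min?_eq_foldl_step, List.foldl_cons]
      rfl
    rw [List.foldl_cons, hstep, ih, hmin, ih y]
    rcases hm : PySem.List.min? ys key with _ | m <;>
      simp only [hm, Option.some.injEq] <;> split_ifs <;> omega

-- the head of the insertion-sort fold over a nonempty accumulator
theorem head?_foldl_ins (key : Int → Nat) :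
    ∀ (xs : List Int) (a : Int) (t : List Int),
      ((xs.foldl (fun acc x => PySem.List.insertBy (fun a b => decide (key a < key b)) x acc) (a :: t)).head?)
        = some (match PySem.List.min? xs key with
                | none => a
                | some m => if key m < key a then m else a) := by
  intro xs
  induction xs with
  | nil => intro a t; rfl
  | cons x xs ih =>
    intro a t
    rw [List.foldl_cons]
    have hmin : PySem.List.min? (x :: xs) key
        = some (match PySem.List.min? xs key with
                | none => x
                | some m => if key m < key x then m else x) := by
      rw [min?_eq_foldl_step, List.foldl_cons]
      show xs.foldl (minStep key) (some x) = _
      rw [min?_fold_some]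
    by_cases hlt : key x < key a
    · have hins : PySem.List.insertBy (fun a b => decide (key a < key b)) x (a :: t)
          = x :: a :: t := by simp [PySem.List.insertBy, hlt]
      rw [hins, ih x (a :: t), hmin]
      rcases hm : PySem.List.min? xs key with _ | m <;>
        simp only [hm, Option.some.injEq] <;> split_ifs <;> omega
    · have hins : PySem.List.insertBy (fun a b => decide (key a < key b)) x (a :: t)
          = a :: PySem.List.insertBy (fun a b => decide (key a < key b)) x t := by
        simp [PySem.List.insertBy, hlt]
      rw [hins, ih a _, hmin]
      rcases hm : PySem.List.min? xs key with _ | m <;>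
        simp only [hm, Option.some.injEq] <;> split_ifs <;> omega

-- head of the stable sort = Python's min(…, key=…) (first minimal element)
theorem head?_sorted (key : Int → Nat) (xs : List Int) :
    (PySem.List.sorted xs key).head? = PySem.List.min? xs key := by
  cases xs with
  | nil => rfl
  | cons x xs =>
    rw [PySem.List.sorted_eq_foldl_insertBy]
    have h0 : PySem.List.insertBy (fun a b => decide (key a < key b)) x ([] : List Int) = [x] := by
      simp [PySem.List.insertBy]
    rw [List.foldl_cons, h0, head?_foldl_ins key xs x []]
    have hmin : PySem.List.min? (x :: xs) key = xs.foldl (minStep key) (some x) := by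
      rw [min?_eq_foldl_step, List.foldl_cons]
      rfl
    rw [hmin, min?_fold_some]

-- Python's for-loop-with-return over a list is the head of its filtered form
theorem find?_eq_head?_filter {α : Type} (p : α → Bool) (xs : List α) :
    xs.find? p = (xs.filter p).head? := by
  induction xs with
  | nil => rfl
  | cons x xs ih =>
    rw [List.filter_cons]
    cases hp : p x
    · rw [List.find?_cons_of_neg (by simp [hp])]
      simp only [hp, Bool.false_eq_true, if_false]
      exact ih
    · rw [List.find?_cons_of_pos (by simp [hp])]
      simp only [hp, if_true]
      rfl

-- closest_py is min? with a default
theorem closest_py_eq (t : Int) (xs : List Int) :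
    closest_py t xs = (PySem.List.min? xs (fun n => (n - t).natAbs)).getD 0 := by
  unfold closest_py
  rcases PySem.List.min? xs (fun n => (n - t).natAbs) with _ | m <;> rfl

-- the directional branch, shared by both ports, for a fixed predicate
theorem branch_eq (p : Int) (roots : List Int) (pred : Int → Bool) :
    closest_py p (if (roots.filter pred).isEmpty then roots else roots.filter pred)
      = (match (PySem.List.sorted roots (fun n => (n - p).natAbs)).find? pred with
         | some n => n
         | none => (PySem.List.sorted roots (fun n => (n - p).natAbs)).headD 0) := by
  have hfind : (PySem.List.sorted roots (fun n => (n - p).natAbs)).find? pred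
      = PySem.List.min? (roots.filter pred) (fun n => (n - p).natAbs) := by
    rw [find?_eq_head?_filter, ← sorted_filter, head?_sorted]
  by_cases hempty : roots.filter pred = []
  · have hmin : PySem.List.min? (roots.filter pred) (fun n => (n - p).natAbs) = none := by
      rw [hempty]; rfl
    rw [hfind, hmin]
    simp only [hempty, List.isEmpty_nil, if_true]
    rw [closest_py_eq, List.headD_eq_head?_getD, head?_sorted]
  · rcases hm : PySem.List.min? (roots.filter pred) (fun n => (n - p).natAbs) with _ | m
    · exact absurd ((PySem.List.min?_eq_none_iff _ _).mp hm) hempty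
    · rw [hfind, hm]
      simp only [List.isEmpty_iff, hempty, if_false]
      rw [closest_py_eq, hm]
      rfl

-- ===== VERDICT (by name: the statement is the Claim_ definition above) =====
theorem pick_root_py_spec : Claim_equal_pick_root_py := by
  intro roots prev_note ascending _ hpre
  unfold Spec_pick_root_py
  cases prev_note with
  | none =>
    show closest_py 38 roots = _
    simp only [pick_root_py_alt]
    rw [closest_py_eq, List.headD_eq_head?_getD, head?_sorted]
  | some p =>
    simp only [pick_root_py, pick_root_py_alt]
    cases ascending
    · simpa using branch_eq p roots (fun n => decide (n ≤ p))
    · simpa using branch_eq p roots (fun n => decide (p ≤ n))
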